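-- pv_equiv track=rewrite | github.com/dbsgh431/Spike_codingTest | Spike/사탕 게임.py | check_horizontal
-- ===== SOURCE A (Python) =====
-- def check_horizontal(i, n_list):
--
--     stack = [n_list[i][0]]
--     count = 1
--     stack_count = [0]
--     for k in range(1, len(n_list)):
--         if stack[-1] == n_list[i][k]:
--             count += 1
--         else:
--             stack_count[0] = max(stack_count[0], count)
--             count = 1
--             stack.clear()
--         stack.append(n_list[i][k])
--     stack_count[0] = max(stack_count[0], count)
--     return max(stack_count)
-- ===== SOURCE B (Python) =====
-- def check_horizontal(i, n_list):
--     n = len(n_list)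
--     seq = [n_list[i][k] for k in range(n)]
--     breaks = [k for k in range(1, n) if seq[k] != seq[k - 1]]
--     edges = [0] + breaks + [n]
--     return max(b - a for a, b in zip(edges, edges[1:]))
-- ===== Notes on version B (the rewrite author's own statement) =====
-- stated objective: alternative
-- what changed: B computes the break positions (indices where the row value changes) as an index list in a staged pipeline, appends the 0/n sentinels, and returns the maximum gap between consecutive break positions, instead of A's element-wise prev/count/max state machine.
import Mathlib
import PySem

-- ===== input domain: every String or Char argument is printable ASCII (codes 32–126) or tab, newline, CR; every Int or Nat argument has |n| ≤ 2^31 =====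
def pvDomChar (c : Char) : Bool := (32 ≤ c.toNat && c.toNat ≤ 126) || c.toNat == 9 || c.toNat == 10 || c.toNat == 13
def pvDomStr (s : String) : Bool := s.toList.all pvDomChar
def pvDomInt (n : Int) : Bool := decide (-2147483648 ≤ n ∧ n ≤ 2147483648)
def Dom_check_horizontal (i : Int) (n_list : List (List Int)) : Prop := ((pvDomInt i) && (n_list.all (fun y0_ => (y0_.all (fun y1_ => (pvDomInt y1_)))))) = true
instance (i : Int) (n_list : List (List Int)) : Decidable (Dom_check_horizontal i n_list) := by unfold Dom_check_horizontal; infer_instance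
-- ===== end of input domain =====

-- B finds the indices where the row value changes and returns the maximum gap between
-- consecutive break positions, instead of A's prev/count/max state machine; same return value on Pre_.

-- ===== PORT A =====
-- loop body of A's for-loop: the if/else on stack[-1], then stack.append
def chStep (st : List Int × Int × List Int) (v : Int) : List Int × Int × List Int :=
  let (stack, count, sc) :=
    if PySem.List.pyGetD st.1 (-1) 0 = v then (st.1, st.2.1 + 1, st.2.2)
    else ([], 1, [max (PySem.List.pyGetD st.2.2 0 0) st.2.1])
  (stack ++ [v], count, sc)

def check_horizontal (i : Int) (n_list : List (List Int)) : Int :=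
  let row := (PySem.List.pyGet? n_list i).getD []
  let r := (PySem.List.pyRange 1 (n_list.length : Int) 1).foldl
            (fun st k => chStep st (PySem.List.pyGetD row k 0))
            ([PySem.List.pyGetD row 0 0], 1, ([0] : List Int))
  let sc := [max (PySem.List.pyGetD r.2.2 0 0) r.2.1]
  -- max(stack_count): stack_count is the singleton sc, so max? is always some
  (PySem.List.max? sc (fun y => y)).getD 0

-- ===== PORT B =====
def check_horizontal_alt (i : Int) (n_list : List (List Int)) : Int :=
  let n : Int := (n_list.length : Int)
  let seq := (PySem.List.pyRange 0 n 1).map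
      (fun k => PySem.List.pyGetD ((PySem.List.pyGet? n_list i).getD []) k 0)
  let breaks := (PySem.List.pyRange 1 n 1).filter
      (fun k => PySem.List.pyGetD seq k 0 != PySem.List.pyGetD seq (k - 1) 0)
  let edges := (0 : Int) :: breaks ++ [n]
  -- edges is a nonempty cons literal, so edges[1:] is edges.tail; max(gen) over the nonempty gap list
  (PySem.List.max? ((edges.zip edges.tail).map (fun p => p.2 - p.1)) (fun y => y)).getD 0

-- ===== PRECONDITION & SPEC =====
-- Pre_ excludes exactly the inputs on which the Python A raises IndexError:
-- an index i outside range(-len,len), or a selected row shorter than len(n_list).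
def Pre_check_horizontal (i : Int) (n_list : List (List Int)) : Prop :=
  PySem.Raise.InRange n_list.length i ∧
  n_list.length ≤ ((PySem.List.pyGet? n_list i).getD []).length
instance (i : Int) (n_list : List (List Int)) : Decidable (Pre_check_horizontal i n_list) := by unfold Pre_check_horizontal; infer_instance
def pvWitness_check_horizontal : Int × List (List Int) := (0, [[1, 2], [3, 3]])
def Spec_check_horizontal (i : Int) (n_list : List (List Int)) (out : Int) : Prop := out = check_horizontal_alt i n_list
instance (i : Int) (n_list : List (List Int)) (out : Int) : Decidable (Spec_check_horizontal i n_list out) := by unfold Spec_check_horizontal; infer_instance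

-- ===== CLAIM (what is proved, stated in full; the proofs are below) =====
def Claim_equal_check_horizontal : Prop := ∀ (i : Int) (n_list : List (List Int)), Dom_check_horizontal i n_list → Pre_check_horizontal i n_list → Spec_check_horizontal i n_list (check_horizontal i n_list)

-- ===== LEMMAS AND PROOFS =====

-- abstract form of A's loop state: (previous element, current run count, best so far)
def aRun : Int → Int → Int → List Int → Int
  | _, c, b, [] => max b c
  | p, c, b, v :: vs => if p = v then aRun p (c + 1) b vs else aRun v 1 (max b c) vs

-- longest run of a list, run-by-run
def lr : List Int → Int
  | [] => 0
  | x :: xs =>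
    max (1 + ((xs.takeWhile (fun y => y == x)).length : Int))
        (lr (xs.dropWhile (fun y => y == x)))
termination_by l => l.length
decreasing_by
  have := List.length_dropWhile_le (fun y => y == x) xs
  simp only [List.length_cons]; omega

theorem lr_nonneg : ∀ l : List Int, 0 ≤ lr l := by
  intro l
  induction l using lr.induct with
  | case1 => simp [lr]
  | case2 x xs ih => rw [lr]; omega

theorem foldA (l : List Int) : ∀ (stack : List Int) (h : stack ≠ []) (c b : Int),
    (max (PySem.List.pyGetD (l.foldl chStep (stack, c, [b])).2.2 0 0)
         (l.foldl chStep (stack, c, [b])).2.1)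
      = aRun (stack.getLast h) c b l := by
  induction l with
  | nil =>
    intro stack h c b
    simp [aRun, PySem.List.pyGetD_zero_cons]
  | cons v vs ih =>
    intro stack h c b
    have hlast : PySem.List.pyGetD stack (-1) 0 = stack.getLast h :=
      PySem.List.pyGetD_neg_one stack 0 h
    by_cases hpv : stack.getLast h = v
    · have hstep : chStep (stack, c, [b]) v = (stack ++ [v], c + 1, [b]) := by
        simp [chStep, hlast, hpv]
      have hne : stack ++ [v] ≠ [] := by simp
      have := ih (stack ++ [v]) hne (c + 1) b
      rw [List.foldl_cons, hstep, this, aRun, if_pos hpv]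
      congr 1
      simp
      exact hpv.symm
    · have hstep : chStep (stack, c, [b]) v
          = ([v], 1, [max (PySem.List.pyGetD [b] 0 0) c]) := by
        simp [chStep, hlast, hpv]
      have hne : ([v] : List Int) ≠ [] := by simp
      have := ih [v] hne 1 (max b c)
      rw [List.foldl_cons, hstep, aRun, if_neg hpv]
      simpa [PySem.List.pyGetD_zero_cons] using this

theorem aRun_eq (l : List Int) : ∀ (p c b : Int), 1 ≤ c →
    aRun p c b l
      = max b (max (c + ((l.takeWhile (fun y => y == p)).length : Int))
                   (lr (l.dropWhile (fun y => y == p)))) := by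
  induction l with
  | nil =>
    intro p c b hc
    simp only [aRun, List.takeWhile_nil, List.dropWhile_nil, lr, List.length_nil]
    omega
  | cons v vs ih =>
    intro p c b hc
    by_cases hpv : p = v
    · subst hpv
      rw [aRun, if_pos rfl]
      rw [ih p (c + 1) b (by omega)]
      simp
      omega
    · have hvb : (v == p) = false := by
        simp; exact fun h => hpv h.symm
      rw [aRun, if_neg hpv]
      rw [ih v 1 (max b c) (by omega)]
      simp only [List.takeWhile_cons, List.dropWhile_cons, hvb, Bool.false_eq_true,
        if_false, List.length_nil, lr]
      have h1 := lr_nonneg (vs.dropWhile (fun y => y == v))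
      omega

-- B abstracted: the break-index list of a row tail, starting at index j with previous value prev
def idxBreaks : Int → Int → List Int → List Int
  | _, _, [] => []
  | j, prev, y :: ys => (if y = prev then [] else [j]) ++ idxBreaks (j + 1) y ys

-- maximum gap of the edge list a :: l ++ [stop]
def G : Int → List Int → Int → Int
  | a, [], stop => stop - a
  | a, b :: l, stop => max (b - a) (G b l stop)

theorem gapsFold : ∀ (l : List Int) (a stop x : Int),
    (((a :: (l ++ [stop])).zip (l ++ [stop])).map (fun p => p.2 - p.1)).foldl max x
      = max x (G a l stop) := by
  intro l
  induction l with
  | nil => intro a stop x; simp [G]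
  | cons b l ih =>
    intro a stop x
    simp only [List.cons_append, List.zip_cons_cons, List.map_cons, List.foldl_cons]
    rw [ih b stop (max x (b - a)), G]
    omega

theorem gapEval : ∀ (l : List Int) (a stop : Int),
    (PySem.List.max? (((a :: l ++ [stop]).zip ((a :: l ++ [stop]).tail)).map
        (fun p => p.2 - p.1)) (fun y => y)).getD 0 = G a l stop := by
  intro l a stop
  cases l with
  | nil => simp [PySem.List.max?_id_cons, G]
  | cons b l =>
    simp only [List.cons_append, List.tail_cons, List.zip_cons_cons, List.map_cons,
      PySem.List.max?_id_cons, Option.getD_some]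
    rw [gapsFold l b stop (b - a), G]

theorem breaksFilt : ∀ (t : List Int) (seq : List Int) (j : Int), 1 ≤ j →
    t = seq.drop j.toNat →
    (PySem.List.pyRange j (seq.length : Int) 1).filter
        (fun k => PySem.List.pyGetD seq k 0 != PySem.List.pyGetD seq (k - 1) 0)
      = idxBreaks j (PySem.List.pyGetD seq (j - 1) 0) t := by
  intro t
  induction t with
  | nil =>
    intro seq j hj ht
    have hlen : seq.length ≤ j.toNat := by
      rw [← List.drop_eq_nil_iff]; exact ht.symm
    rw [PySem.List.pyRange_one_eq_nil (by omega)]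
    simp [idxBreaks]
  | cons y ys ih =>
    intro seq j hj ht
    have hjn : j.toNat < seq.length := by
      by_contra hc
      have : seq.drop j.toNat = [] := List.drop_eq_nil_iff.mpr (by omega)
      rw [this] at ht; exact (List.cons_ne_nil y ys) ht
    have hjlt : j < (seq.length : Int) := by omega
    have hd : seq.drop j.toNat = seq[j.toNat] :: seq.drop (j.toNat + 1) :=
      (List.getElem_cons_drop hjn).symm
    rw [hd] at ht
    injection ht with hy hys
    have hget : PySem.List.pyGetD seq j 0 = y := by
      rw [PySem.List.pyGetD_eq_getElem seq 0 (by omega) hjlt]; exact hy.symm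
    have hys' : ys = seq.drop (j + 1).toNat := by
      rw [hys]; congr 1; omega
    have hrec := ih seq (j + 1) (by omega) hys'
    have hj1 : j + 1 - 1 = j := by omega
    rw [hj1, hget] at hrec
    rw [PySem.List.pyRange_one_cons hjlt, List.filter_cons, hrec]
    by_cases hyp : y = PySem.List.pyGetD seq (j - 1) 0
    · simp [idxBreaks, hget, hyp]
    · simp [idxBreaks, hget, hyp]

theorem GaRun : ∀ (ys : List Int) (prev a b : Int), a < b →
    G a (idxBreaks b prev ys) (b + (ys.length : Int)) = aRun prev (b - a) 0 ys := by
  intro ys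
  induction ys with
  | nil =>
    intro prev a b hab
    simp only [idxBreaks, G, List.length_nil, Int.natCast_zero, add_zero, aRun]
    omega
  | cons y ys ih =>
    intro prev a b hab
    have h1 : b + (((y :: ys).length : Nat) : Int) = (b + 1) + (ys.length : Int) := by
      simp; omega
    by_cases hyp : y = prev
    · subst hyp
      rw [show idxBreaks b y (y :: ys) = idxBreaks (b + 1) y ys by simp [idxBreaks],
          show aRun y (b - a) 0 (y :: ys) = aRun y (b - a + 1) 0 ys by simp [aRun],
          h1, ih y a (b + 1) (by omega), show b + 1 - a = b - a + 1 by omega]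
    · have hyp' : prev ≠ y := Ne.symm hyp
      rw [show idxBreaks b prev (y :: ys) = b :: idxBreaks (b + 1) y ys by
            simp [idxBreaks, hyp],
          show aRun prev (b - a) 0 (y :: ys) = aRun y 1 (max 0 (b - a)) ys by
            simp [aRun, hyp'],
          G, h1, ih y b (b + 1) (by omega), show b + 1 - b = 1 by omega,
          show max 0 (b - a) = b - a by omega]
      rw [aRun_eq ys y 1 0 (by omega), aRun_eq ys y 1 (b - a) (by omega)]
      have h3 := lr_nonneg (ys.dropWhile (fun z => z == y))
      have h4 : (0 : Int) ≤ ((ys.takeWhile (fun z => z == y)).length : Int) := by positivity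
      omega

-- ===== VERDICT (by name: the statements are the Claim_ definitions above) =====
theorem check_horizontal_spec : Claim_equal_check_horizontal := by
  intro i n_list _hdom hpre
  obtain ⟨hin, _hrow⟩ := hpre
  have hpos : 0 < (n_list.length : Int) := by
    unfold PySem.Raise.InRange at hin; omega
  unfold Spec_check_horizontal check_horizontal check_horizontal_alt
  set row := (PySem.List.pyGet? n_list i).getD [] with hrow
  set n : Int := (n_list.length : Int) with hn
  set f : Int → Int := fun k => PySem.List.pyGetD row k 0 with hf
  set seq := (PySem.List.pyRange 0 n 1).map f with hseq
  show (PySem.List.max?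
      [max (PySem.List.pyGetD ((PySem.List.pyRange 1 n 1).foldl (fun st k => chStep st (f k)) ([f 0], 1, ([0] : List Int))).2.2 0 0)
           ((PySem.List.pyRange 1 n 1).foldl (fun st k => chStep st (f k)) ([f 0], 1, ([0] : List Int))).2.1] (fun y => y)).getD 0
    = (PySem.List.max? (((((0 : Int) :: (PySem.List.pyRange 1 n 1).filter
          (fun k => PySem.List.pyGetD seq k 0 != PySem.List.pyGetD seq (k - 1) 0) ++ [n])).zip
        (((0 : Int) :: (PySem.List.pyRange 1 n 1).filter
          (fun k => PySem.List.pyGetD seq k 0 != PySem.List.pyGetD seq (k - 1) 0) ++ [n])).tail).map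
        (fun p => p.2 - p.1)) (fun y => y)).getD 0
  set rest := (PySem.List.pyRange 1 n 1).map f with hrest
  have hcons : seq = f 0 :: rest := by
    rw [hseq, hrest, PySem.List.pyRange_one_cons hpos, List.map_cons]; norm_num
  have hseqlen : (seq.length : Int) = n := by
    rw [hseq, List.length_map, PySem.List.length_pyRange_one]; omega
  have hrestlen : (rest.length : Int) = n - 1 := by
    rw [hrest, List.length_map, PySem.List.length_pyRange_one]; omega
  -- A side
  have hfold : (PySem.List.pyRange 1 n 1).foldl (fun st k => chStep st (f k))
        ([f 0], 1, ([0] : List Int))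
      = rest.foldl chStep ([f 0], 1, ([0] : List Int)) := by
    rw [hrest, List.foldl_map]
  have hA := foldA rest [f 0] (by simp) 1 0
  simp only [List.getLast_singleton] at hA
  have hmax1 : ∀ x : Int, (PySem.List.max? [x] (fun y => y)).getD 0 = x := by
    intro x; simp [PySem.List.max?_id_cons]
  rw [hfold, hmax1, hA]
  -- B side
  have hdrop : rest = seq.drop (1 : Int).toNat := by rw [hcons]; simp
  have hprev : PySem.List.pyGetD seq ((1 : Int) - 1) 0 = f 0 := by
    rw [hcons]
    norm_num [PySem.List.pyGetD_zero_cons]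
  have hbr : (PySem.List.pyRange 1 n 1).filter
        (fun k => PySem.List.pyGetD seq k 0 != PySem.List.pyGetD seq (k - 1) 0)
      = idxBreaks 1 (f 0) rest := by
    have := breaksFilt rest seq 1 (by omega) hdrop
    rw [hseqlen, hprev] at this
    exact this
  rw [hbr, gapEval (idxBreaks 1 (f 0) rest) 0 n]
  have hstop : n = 1 + (rest.length : Int) := by omega
  rw [hstop, GaRun rest (f 0) 0 1 (by omega)]
  norm_num
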